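-- pv_equiv track=rewrite | github.com/Discomoth/lightjar | simulator.py | remap_leds
-- ===== SOURCE A (Python) =====
-- def remap_leds(neo_led_obj):
--     final_list = []
--     temp_list = []
--     reverse = True
--     for led in range(len(neo_led_obj)):
--         temp_list.append(led)
--
--         if (led+1) % 8 == 0 and reverse:
--             temp_list.reverse()
--             final_list.extend(temp_list)
--             temp_list = []
--             reverse = False
--
--         elif (led+1) % 8 == 0 and not reverse:
--             final_list.extend(temp_list)
--             temp_list = []
--             reverse = True
--
--     return final_list
-- ===== SOURCE B (Python) =====
-- def remap_leds(neo_led_obj):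
--     return [g * 8 + (7 - i if g % 2 == 0 else i)
--             for g in range(len(neo_led_obj) // 8)
--             for i in range(8)]
-- ===== Notes on version B (the rewrite author's own statement) =====
-- stated objective: simpler
-- what changed: Replaces the stateful single pass (temp buffer, reverse flag, modulo check) with a double comprehension over complete 8-groups that computes each remapped index by a closed-form formula (even groups reversed).
import Mathlib
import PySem

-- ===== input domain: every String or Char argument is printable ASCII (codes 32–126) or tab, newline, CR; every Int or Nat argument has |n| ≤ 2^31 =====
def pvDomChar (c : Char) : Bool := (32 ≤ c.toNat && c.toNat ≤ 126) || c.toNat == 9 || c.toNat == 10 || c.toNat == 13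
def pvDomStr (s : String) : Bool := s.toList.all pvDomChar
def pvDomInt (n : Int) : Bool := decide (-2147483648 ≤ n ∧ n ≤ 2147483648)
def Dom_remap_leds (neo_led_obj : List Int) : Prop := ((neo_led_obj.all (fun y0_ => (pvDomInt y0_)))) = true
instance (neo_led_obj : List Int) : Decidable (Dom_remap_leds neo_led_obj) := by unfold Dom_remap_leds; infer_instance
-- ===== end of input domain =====

-- B replaces A's stateful pass (temp buffer + reverse flag) by a closed-form double
-- comprehension over complete 8-groups; objective: simpler.

-- ===== PORT A =====
-- one loop iteration of A: state = (final_list, temp_list, reverse)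
def remapStepA (st : List Int × List Int × Bool) (led : Int) : List Int × List Int × Bool :=
  let temp_list := st.2.1 ++ [led]
  if (led + 1) % 8 = 0 ∧ st.2.2 = true then
    (st.1 ++ temp_list.reverse, [], false)
  else if (led + 1) % 8 = 0 ∧ st.2.2 = false then
    (st.1 ++ temp_list, [], true)
  else
    (st.1, temp_list, st.2.2)

def remap_leds (neo_led_obj : List Int) : List Int :=
  ((PySem.List.pyRange 0 (neo_led_obj.length : Int) 1).foldl remapStepA ([], [], true)).1

-- ===== PORT B =====
def remapGroupB (g : Nat) : List Int :=
  (List.range 8).map (fun i => (g : Int) * 8 + (if g % 2 = 0 then 7 - (i : Int) else (i : Int)))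

def remap_leds_alt (neo_led_obj : List Int) : List Int :=
  (List.range (neo_led_obj.length / 8)).flatMap remapGroupB

-- ===== PRECONDITION & SPEC =====
def Spec_remap_leds (neo_led_obj : List Int) (out : List Int) : Prop := out = remap_leds_alt neo_led_obj
instance (neo_led_obj : List Int) (out : List Int) : Decidable (Spec_remap_leds neo_led_obj out) := by unfold Spec_remap_leds; infer_instance

-- ===== CLAIM (what is proved, stated in full; the proofs are below) =====
def Claim_equal_remap_leds : Prop := ∀ (neo_led_obj : List Int), Dom_remap_leds neo_led_obj → Spec_remap_leds neo_led_obj (remap_leds neo_led_obj)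

-- ===== LEMMAS AND PROOFS =====

lemma step_mid (f t : List Int) (r : Bool) (led : Int) (h : (led + 1) % 8 ≠ 0) :
    remapStepA (f, t, r) led = (f, t ++ [led], r) := by
  simp [remapStepA, h]

lemma tail_fst (L : List Int) (h : ∀ x ∈ L, (x + 1) % 8 ≠ 0) (f t : List Int) (r : Bool) :
    (List.foldl remapStepA (f, t, r) L).1 = f := by
  induction L generalizing t with
  | nil => rfl
  | cons x xs ih =>
      rw [List.foldl_cons, step_mid _ _ _ _ (h x (by simp))]
      exact ih (fun y hy => h y (by simp [hy])) _

lemma chunk (a : Int) (f : List Int) (r : Bool) (ha : a % 8 = 0) :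
    List.foldl remapStepA (f, [], r) (PySem.List.pyRange a (a + 8) 1)
      = (f ++ (if r then [a+7, a+6, a+5, a+4, a+3, a+2, a+1, a]
               else [a, a+1, a+2, a+3, a+4, a+5, a+6, a+7]), [], !r) := by
  have hr : PySem.List.pyRange a (a + 8) 1 = [a, a+1, a+2, a+3, a+4, a+5, a+6, a+7] := by
    rw [PySem.List.pyRange_one]
    rw [show (a + 8 - a).toNat = 8 by omega, show List.range 8 = [0,1,2,3,4,5,6,7] from rfl]
    norm_num
  rw [hr]
  simp only [List.foldl_cons, List.foldl_nil]
  rw [step_mid _ _ _ a (by omega), step_mid _ _ _ (a+1) (by omega), step_mid _ _ _ (a+2) (by omega),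
      step_mid _ _ _ (a+3) (by omega), step_mid _ _ _ (a+4) (by omega), step_mid _ _ _ (a+5) (by omega),
      step_mid _ _ _ (a+6) (by omega)]
  cases r <;> simp [remapStepA] <;> omega

lemma groups (q : Nat) :
    List.foldl remapStepA ([], [], true) (PySem.List.pyRange 0 (8 * (q : Int)) 1)
      = ((List.range q).flatMap remapGroupB, [], decide (q % 2 = 0)) := by
  induction q with
  | zero => simp [PySem.List.pyRange_one_eq_nil]
  | succ q ih =>
      have hsplit : PySem.List.pyRange 0 (8 * ((q + 1 : Nat) : Int)) 1
          = PySem.List.pyRange 0 (8 * (q : Int)) 1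
            ++ PySem.List.pyRange (8 * (q : Int)) (8 * (q : Int) + 8) 1 := by
        have := PySem.List.pyRange_one_append 0 (8 * (q : Int)) (8 * (q : Int) + 8)
          (by positivity) (by omega)
        rw [show (8 * ((q + 1 : Nat) : Int)) = 8 * (q : Int) + 8 by push_cast; ring]
        exact this
      rw [hsplit, List.foldl_append, ih, chunk _ _ _ (by omega)]
      have hrange : List.range (q + 1) = List.range q ++ [q] := List.range_succ
      have h8 : List.range 8 = [0, 1, 2, 3, 4, 5, 6, 7] := by rfl
      by_cases h : q % 2 = 0 <;>
        simp [h, hrange, remapGroupB, h8, Nat.add_mod] <;> omega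

-- ===== VERDICT (by name: the statement is the Claim_ definition above) =====
theorem remap_leds_spec : Claim_equal_remap_leds := by
  intro l _
  show remap_leds l = remap_leds_alt l
  unfold remap_leds
  set n := l.length with hn
  set q := n / 8 with hq
  have hsplit : PySem.List.pyRange 0 (n : Int) 1
      = PySem.List.pyRange 0 (8 * (q : Int)) 1 ++ PySem.List.pyRange (8 * (q : Int)) (n : Int) 1 := by
    exact PySem.List.pyRange_one_append 0 (8 * (q : Int)) (n : Int) (by positivity) (by omega)
  rw [hsplit, List.foldl_append, groups q]
  rw [tail_fst]
  · rfl
  · intro x hx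
    rw [PySem.List.mem_pyRange_one] at hx
    omega
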